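-- pv_equiv track=rewrite | github.com/Rommagcom/smartai | scripts/smoke_worker_queue.py | _remove_from_left
-- ===== SOURCE A (Python) =====
-- def _remove_from_left(queue: list[str], value: str, count: int) -> tuple[int, list[str]]:
--     removed = 0
--     retained: list[str] = []
--     remaining = count
--     for item in queue:
--         if item == value and remaining > 0:
--             removed += 1
--             remaining -= 1
--             continue
--         retained.append(item)
--     return removed, retained
-- ===== SOURCE B (Python) =====
-- def _remove_from_left(queue: list[str], value: str, count: int) -> tuple[int, list[str]]:
--     removed = min(max(count, 0), queue.count(value))
--     retained = list(queue)
--     for _ in range(removed):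
--         retained.remove(value)
--     return removed, retained
-- ===== Notes on version B (the rewrite author's own statement) =====
-- stated objective: simpler
-- what changed: Replaces the single filter pass with a countdown counter by a count-first decomposition: compute removed = min(max(count,0), queue.count(value)) up front, then delete that many leftmost occurrences with list.remove on a copy.
import Mathlib
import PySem

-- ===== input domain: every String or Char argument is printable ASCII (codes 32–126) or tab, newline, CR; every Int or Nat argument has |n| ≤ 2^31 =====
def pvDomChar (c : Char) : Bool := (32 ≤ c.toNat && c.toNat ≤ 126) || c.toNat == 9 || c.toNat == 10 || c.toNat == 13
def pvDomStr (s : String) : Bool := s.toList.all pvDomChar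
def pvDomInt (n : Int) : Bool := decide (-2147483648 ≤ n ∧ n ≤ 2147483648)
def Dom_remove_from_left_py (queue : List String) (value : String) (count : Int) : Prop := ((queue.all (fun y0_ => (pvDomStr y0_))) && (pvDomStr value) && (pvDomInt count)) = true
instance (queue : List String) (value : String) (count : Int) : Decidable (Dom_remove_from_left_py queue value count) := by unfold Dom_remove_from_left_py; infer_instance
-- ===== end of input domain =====

-- B replaces A's single filter pass with a countdown by computing the number of removals
-- up front and then deleting that many leftmost occurrences from a copy (objective: simpler).

-- ===== PORT A =====
-- A's for-loop over queue with state (removed, retained, remaining), as a tail recursion.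
def removeFromLeftLoop (value : String) : List String → Int → List String → Int → Int × List String
  | [], removed, retained, _ => (removed, retained)
  | item :: rest, removed, retained, remaining =>
    if item == value && remaining > 0 then
      removeFromLeftLoop value rest (removed + 1) retained (remaining - 1)
    else
      removeFromLeftLoop value rest removed (retained ++ [item]) remaining

def remove_from_left_py (queue : List String) (value : String) (count : Int) : Int × List String :=
  removeFromLeftLoop value queue 0 [] count

-- ===== PORT B =====
-- B: removed = min(max(count, 0), queue.count(value)); then 'for _ in range(removed): retained.remove(value)'.
-- list.remove → PySem.List.remove?; getD is safe: removed ≤ queue.count value, so value is always present.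
def remove_from_left_py_alt (queue : List String) (value : String) (count : Int) : Int × List String :=
  let removed : Int := min (max count 0) (PySem.List.count queue value)
  let retained := (PySem.List.pyRange 0 removed 1).foldl
    (fun st _ => (PySem.List.remove? st value).getD st) queue
  (removed, retained)

-- ===== PRECONDITION & SPEC =====
def Spec_remove_from_left_py (queue : List String) (value : String) (count : Int) (out : Int × List String) : Prop := out = remove_from_left_py_alt queue value count
instance (queue : List String) (value : String) (count : Int) (out : Int × List String) : Decidable (Spec_remove_from_left_py queue value count out) := by unfold Spec_remove_from_left_py; infer_instance

-- ===== CLAIM (what is proved, stated in full; the proofs are below) =====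
def Claim_equal_remove_from_left_py : Prop := ∀ (queue : List String) (value : String) (count : Int), Dom_remove_from_left_py queue value count → Spec_remove_from_left_py queue value count (remove_from_left_py queue value count)

-- ===== LEMMAS AND PROOFS =====

-- one step of B's loop
def removeStep (value : String) (st : List String) : List String :=
  (PySem.List.remove? st value).getD st

-- n iterations of B's loop
def removeIter (value : String) : Nat → List String → List String
  | 0, st => st
  | n + 1, st => removeIter value n (removeStep value st)

theorem removeStep_cons_of_ne (value item : String) (rest : List String) (h : item ≠ value) :
    removeStep value (item :: rest) = item :: removeStep value rest := by
  simp only [removeStep, PySem.List.remove?_cons_of_ne rest h]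
  cases PySem.List.remove? rest value <;> simp

theorem removeIter_cons_of_ne (value item : String) (n : Nat) (rest : List String) (h : item ≠ value) :
    removeIter value n (item :: rest) = item :: removeIter value n rest := by
  induction n generalizing rest with
  | zero => rfl
  | succ n ih => simp [removeIter, removeStep_cons_of_ne value item rest h, ih]

-- B's range-fold is removeIter
theorem foldl_range_removeIter (value : String) (n : Int) (st : List String) :
    (PySem.List.pyRange 0 n 1).foldl (fun s _ => (PySem.List.remove? s value).getD s) st
      = removeIter value n.toNat st := by
  have key : ∀ (k : Nat) (a : Int) (st : List String), (a + k : Int) = n →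
      (PySem.List.pyRange a n 1).foldl (fun s _ => (PySem.List.remove? s value).getD s) st
        = removeIter value k st := by
    intro k
    induction k with
    | zero =>
      intro a st ha
      rw [PySem.List.pyRange_one_eq_nil (by omega)]
      rfl
    | succ k ih =>
      intro a st ha
      rw [PySem.List.pyRange_one_cons (by omega)]
      simp only [List.foldl_cons]
      exact ih (a + 1) _ (by omega)
  by_cases h : n ≤ 0
  · rw [PySem.List.pyRange_one_eq_nil h]
    have : n.toNat = 0 := by omega
    rw [this]; rfl
  · exact key n.toNat 0 st (by omega)

-- the mathematical spec both programs compute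
def specRFL (value : String) : List String → Int → Int × List String
  | [], _ => (0, [])
  | item :: rest, rem =>
    if item = value ∧ rem > 0 then
      ((specRFL value rest (rem - 1)).1 + 1, (specRFL value rest (rem - 1)).2)
    else
      ((specRFL value rest rem).1, item :: (specRFL value rest rem).2)

-- A's loop computes specRFL
theorem aLoop_eq_spec (value : String) (q : List String) (removed : Int) (retained : List String) (rem : Int) :
    removeFromLeftLoop value q removed retained rem
      = (removed + (specRFL value q rem).1, retained ++ (specRFL value q rem).2) := by
  induction q generalizing removed retained rem with
  | nil => simp [removeFromLeftLoop, specRFL]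
  | cons item rest ih =>
    by_cases h : item = value ∧ rem > 0
    · have hb : (item == value && decide (rem > 0)) = true := by
        simp [h.1, h.2]
      simp only [removeFromLeftLoop, specRFL, hb, if_pos h, if_true, ih]
      simp only [Prod.mk.injEq]
      exact ⟨by ring, trivial⟩
    · have hb : (item == value && decide (rem > 0)) = false := by
        rcases not_and_or.mp h with h1 | h2
        · simp [h1]
        · simp [show ¬ rem > 0 from h2]
      simp only [removeFromLeftLoop, specRFL, hb, if_neg h, Bool.false_eq_true, if_false, ih]
      simp

-- specRFL equals B's (clamped count, iterated leftmost removal)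
theorem spec_eq_alt (value : String) (q : List String) (rem : Int) :
    specRFL value q rem
      = (min (max rem 0) ((PySem.List.count q value : Nat) : Int),
         removeIter value (min (max rem 0) ((PySem.List.count q value : Nat) : Int)).toNat q) := by
  induction q generalizing rem with
  | nil =>
    have h0 : min (max rem 0) (((PySem.List.count ([] : List String) value : Nat)) : Int) = 0 := by
      simp [PySem.List.count_eq]
    rw [h0]
    simp [specRFL, removeIter]
  | cons item rest ih =>
    have hcnt : (0 : Int) ≤ ((PySem.List.count rest value : Nat) : Int) := by positivity
    by_cases h : item = value ∧ rem > 0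
    · have hc : (PySem.List.count (item :: rest) value : Int)
          = ((PySem.List.count rest value : Nat) : Int) + 1 := by
        simp [PySem.List.count_eq, h.1]
      have hm : min (max rem 0) ((PySem.List.count (item :: rest) value : Nat) : Int)
          = min (max (rem - 1) 0) ((PySem.List.count rest value : Nat) : Int) + 1 := by
        rw [hc]; omega
      have hge : 0 ≤ min (max (rem - 1) 0) ((PySem.List.count rest value : Nat) : Int) := by omega
      have hm1 : (min (max (rem - 1) 0) ((PySem.List.count rest value : Nat) : Int) + 1).toNat
          = (min (max (rem - 1) 0) ((PySem.List.count rest value : Nat) : Int)).toNat + 1 := by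
        omega
      rw [hm, hm1]
      simp only [specRFL, if_pos h, ih]
      simp only [Prod.mk.injEq]
      refine ⟨trivial, ?_⟩
      have hstep : removeStep value (item :: rest) = rest := by
        simp [removeStep, h.1]
      simp [removeIter, hstep]
    · rcases not_and_or.mp h with hne | hle
      · have hc : ((PySem.List.count (item :: rest) value : Nat) : Int)
            = ((PySem.List.count rest value : Nat) : Int) := by
          simp [PySem.List.count_eq, hne]
        simp only [specRFL, if_neg h, ih, hc]
        rw [removeIter_cons_of_ne value item _ rest hne]
      · have hrem : ¬ rem > 0 := hle
        have hm : min (max rem 0) ((PySem.List.count (item :: rest) value : Nat) : Int) = 0 := by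
          have : (0 : Int) ≤ ((PySem.List.count (item :: rest) value : Nat) : Int) := by positivity
          omega
        have hm' : min (max rem 0) ((PySem.List.count rest value : Nat) : Int) = 0 := by omega
        rw [hm]
        simp only [specRFL, if_neg h, ih, hm']
        simp [removeIter]

-- ===== VERDICT (by name: the statement is the Claim_ definition above) =====
theorem remove_from_left_py_spec : Claim_equal_remove_from_left_py := by
  intro queue value count _
  show remove_from_left_py queue value count = remove_from_left_py_alt queue value count
  have hB : remove_from_left_py_alt queue value count
      = (min (max count 0) ((PySem.List.count queue value : Nat) : Int),
         (PySem.List.pyRange 0 (min (max count 0) ((PySem.List.count queue value : Nat) : Int)) 1).foldl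
           (fun st _ => (PySem.List.remove? st value).getD st) queue) := rfl
  rw [hB, foldl_range_removeIter]
  show removeFromLeftLoop value queue 0 [] count = _
  rw [aLoop_eq_spec, spec_eq_alt]
  simp
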